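-- pv_equiv track=rewrite | github.com/Gordey-Kachurin/nearest_house | nearest_house.py | hn
-- ===== SOURCE A (Python) =====
-- def hn(house_numbers):
--     distance = 0
--     distance_list = []
--     for index, item in enumerate(house_numbers):
--         if item == 0:
--             distance_list.append(item)
--             continue # skip the rest of the code and continue to the next interation
--         for i in  range(index, len(house_numbers)) :
--
--             if house_numbers[i] != 0:
--                 distance = distance + 1
--
--             else:
--                 distance_list.append(distance)
--                 distance = 0
--                 break # exit inner for loop to continue outer loop
--     return distance_list
-- ===== SOURCE B (Python) =====
-- def hn(house_numbers):
--     # Single right-to-left pass tracking the distance to the nearest zero seen so far.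
--     out = []
--     dist = None
--     for x in reversed(house_numbers):
--         if x == 0:
--             dist = 0
--             out.append(0)
--         elif dist is not None:
--             dist += 1
--             out.append(dist)
--     out.reverse()
--     return out
-- ===== Notes on version B (the rewrite author's own statement) =====
-- stated objective: faster
-- what changed: Replaced A's forward scan to the next zero from each non-zero element (nested loops) by a single right-to-left pass that carries the running distance to the nearest zero seen so far.
import Mathlib
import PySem

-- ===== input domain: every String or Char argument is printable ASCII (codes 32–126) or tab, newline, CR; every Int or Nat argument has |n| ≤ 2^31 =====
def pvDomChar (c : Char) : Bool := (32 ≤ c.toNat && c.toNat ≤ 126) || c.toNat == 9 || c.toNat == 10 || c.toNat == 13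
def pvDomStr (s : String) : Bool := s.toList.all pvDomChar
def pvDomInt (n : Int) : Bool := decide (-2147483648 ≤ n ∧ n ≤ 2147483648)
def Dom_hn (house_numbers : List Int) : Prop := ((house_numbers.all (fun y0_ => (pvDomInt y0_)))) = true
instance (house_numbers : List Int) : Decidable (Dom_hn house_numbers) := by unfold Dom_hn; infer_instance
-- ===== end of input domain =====

-- B replaces A's quadratic forward scan-to-next-zero with one right-to-left pass
-- carrying the running distance to the nearest zero (objective: faster, asymptotic).

-- ===== PORT A =====
-- inner `for i in range(index, len(...))` loop: returns (distance, appended value on break or none);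
-- fuel = number of remaining loop iterations (makes the recursion structural; falls out of range never hit)
def hnInner (xs : List Int) : Nat → Nat → Int → Int × Option Int
  | 0, _, d => (d, none)
  | fuel + 1, i, d =>
    match xs[i]? with
    | none => (d, none)
    | some v => if v ≠ 0 then hnInner xs fuel (i + 1) (d + 1) else (0, some d)

-- outer `for index, item in enumerate(...)` loop, building distance_list front-to-back
def hnOuter (xs : List Int) : Nat → Nat → Int → List Int
  | 0, _, _ => []
  | fuel + 1, i, d =>
    match xs[i]? with
    | none => []
    | some item =>
      if item = 0 then item :: hnOuter xs fuel (i + 1) d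
      else
        match hnInner xs (xs.length - i) i d with
        | (_, some v) => v :: hnOuter xs fuel (i + 1) 0
        | (d', none) => hnOuter xs fuel (i + 1) d'

def hn (house_numbers : List Int) : List Int := hnOuter house_numbers house_numbers.length 0 0

-- ===== PORT B =====
-- one pass over reversed(house_numbers), state = (out list built by append, Optional distance)
def hnAltStep (st : List Int × Option Int) (x : Int) : List Int × Option Int :=
  match st with
  | (out, dist) =>
    if x = 0 then (out ++ [0], some 0)
    else
      match dist with
      | some d => (out ++ [d + 1], some (d + 1))
      | none => (out, none)

def hn_alt (house_numbers : List Int) : List Int :=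
  (house_numbers.reverse.foldl hnAltStep ([], none)).1.reverse

-- ===== PRECONDITION & SPEC =====
def Spec_hn (house_numbers : List Int) (out : List Int) : Prop := out = hn_alt house_numbers
instance (house_numbers : List Int) (out : List Int) : Decidable (Spec_hn house_numbers out) := by unfold Spec_hn; infer_instance

-- ===== CLAIM (what is proved, stated in full; the proofs are below) =====
def Claim_equal_hn : Prop := ∀ (house_numbers : List Int), Dom_hn house_numbers → Spec_hn house_numbers (hn house_numbers)

-- ===== LEMMAS AND PROOFS =====

-- reference spec, recursion from the right: (output list, distance from head to first zero)
def rsp : List Int → List Int × Option Int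
  | [] => ([], none)
  | x :: t =>
    if x = 0 then (0 :: (rsp t).1, some 0)
    else
      match (rsp t).2 with
      | some k => ((k + 1) :: (rsp t).1, some (k + 1))
      | none => ((rsp t).1, none)

-- structural versions of A's loops over the dropped suffix
def innerS : List Int → Int → Int × Option Int
  | [], d => (d, none)
  | x :: t, d => if x ≠ 0 then innerS t (d + 1) else (0, some d)

def outerS : List Int → Int → List Int
  | [], _ => []
  | x :: t, d =>
    if x = 0 then x :: outerS t d
    else
      match innerS (x :: t) d with
      | (_, some v) => v :: outerS t 0
      | (d', none) => outerS t d'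

theorem hnInner_eq (xs : List Int) (fuel i : Nat) (d : Int)
    (hf : xs.length ≤ i + fuel) :
    hnInner xs fuel i d = innerS (xs.drop i) d := by
  induction fuel generalizing i d with
  | zero =>
    rw [List.drop_of_length_le (by omega)]
    rfl
  | succ fuel ih =>
    rcases hx : xs[i]? with _ | v
    · rw [List.drop_of_length_le (by simpa using List.getElem?_eq_none_iff.mp hx)]
      simp [hnInner, hx, innerS]
    · have hlt : i < xs.length := (List.getElem?_eq_some_iff.mp hx).1
      have hv : xs[i] = v := (List.getElem?_eq_some_iff.mp hx).2
      rw [List.drop_eq_getElem_cons hlt, hv]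
      by_cases h0 : v = 0
      · simp [hnInner, hx, innerS, h0]
      · simp only [hnInner, hx, h0, ne_eq, not_false_eq_true, if_true, innerS]
        exact ih (i + 1) (d + 1) (by omega)

theorem hnOuter_eq (xs : List Int) (fuel i : Nat) (d : Int)
    (hf : xs.length ≤ i + fuel) :
    hnOuter xs fuel i d = outerS (xs.drop i) d := by
  induction fuel generalizing i d with
  | zero =>
    rw [List.drop_of_length_le (by omega)]
    rfl
  | succ fuel ih =>
    rcases hx : xs[i]? with _ | v
    · rw [List.drop_of_length_le (by simpa using List.getElem?_eq_none_iff.mp hx)]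
      simp [hnOuter, hx, outerS]
    · have hlt : i < xs.length := (List.getElem?_eq_some_iff.mp hx).1
      have hv : xs[i] = v := (List.getElem?_eq_some_iff.mp hx).2
      rw [List.drop_eq_getElem_cons hlt, hv]
      by_cases h0 : v = 0
      · simp only [hnOuter, hx, h0, if_true, outerS]
        rw [ih (i + 1) d (by omega)]
      · have hin : hnInner xs (xs.length - i) i d = innerS (v :: xs.drop (i + 1)) d := by
          rw [hnInner_eq xs (xs.length - i) i d (by omega), List.drop_eq_getElem_cons hlt, hv]
        rcases hz : innerS (v :: xs.drop (i + 1)) d with ⟨d', w⟩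
        rw [hz] at hin
        cases w with
        | none =>
          simp only [hnOuter, hx, h0, if_false, hin, outerS, hz]
          exact ih (i + 1) d' (by omega)
        | some w =>
          simp only [hnOuter, hx, h0, if_false, hin, outerS, hz]
          rw [ih (i + 1) 0 (by omega)]

theorem innerS_spec (t : List Int) (d : Int) :
    innerS t d = match (rsp t).2 with
      | some k => (0, some (d + k))
      | none => (d + t.length, none) := by
  induction t generalizing d with
  | nil => simp [innerS, rsp]
  | cons x t ih =>
    by_cases hx : x = 0
    · simp [innerS, rsp, hx]
    · have h1 : innerS (x :: t) d = innerS t (d + 1) := by simp [innerS, hx]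
      rw [h1, ih]
      rcases hz : (rsp t).2 with _ | k
      · have h2 : (rsp (x :: t)).2 = none := by simp [rsp, hx, hz]
        simp only [h2, Prod.mk.injEq, List.length_cons, and_true]
        push_cast
        omega
      · have h2 : (rsp (x :: t)).2 = some (k + 1) := by simp [rsp, hx, hz]
        simp only [h2, Prod.mk.injEq, Option.some.injEq, true_and]
        omega

theorem rsp_fst_nil_of_none (t : List Int) (h : (rsp t).2 = none) : (rsp t).1 = [] := by
  induction t with
  | nil => simp [rsp]
  | cons x t ih =>
    by_cases hx : x = 0
    · simp [rsp, hx] at h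
    · rcases hz : (rsp t).2 with _ | k
      · simp [rsp, hx, hz, ih hz]
      · simp [rsp, hx, hz] at h

theorem outerS_nil_of_none (t : List Int) (d : Int) (h : (rsp t).2 = none) :
    outerS t d = [] := by
  induction t generalizing d with
  | nil => rfl
  | cons x t ih =>
    by_cases hx : x = 0
    · simp [rsp, hx] at h
    · have ht : (rsp t).2 = none := by
        rcases hz : (rsp t).2 with _ | k
        · rfl
        · simp [rsp, hx, hz] at h
      have h1 : innerS (x :: t) d = innerS t (d + 1) := by simp [innerS, hx]
      have h2 : innerS t (d + 1) = (d + 1 + t.length, none) := by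
        rw [innerS_spec, ht]
      simp only [outerS, hx, if_false, h1, h2]
      exact ih _ ht

theorem outerS_spec (t : List Int) : outerS t 0 = (rsp t).1 := by
  induction t with
  | nil => rfl
  | cons x t ih =>
    by_cases hx : x = 0
    · simp [outerS, rsp, hx, ih]
    · have h1 : innerS (x :: t) 0 = innerS t 1 := by simp [innerS, hx]
      rcases hz : (rsp t).2 with _ | k
      · have h2 : innerS t 1 = ((1 : Int) + (t.length : Int), none) := by rw [innerS_spec, hz]
        simp only [outerS, hx, if_false, h1, h2]
        rw [outerS_nil_of_none t _ hz]
        simp [rsp, hx, hz, rsp_fst_nil_of_none t hz]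
      · have h2 : innerS t 1 = (0, some (1 + k)) := by rw [innerS_spec, hz]
        simp only [outerS, hx, if_false, h1, h2]
        rw [ih]
        simp [rsp, hx, hz]
        omega

theorem altFold_eq (xs : List Int) :
    xs.reverse.foldl hnAltStep ([], none) = ((rsp xs).1.reverse, (rsp xs).2) := by
  induction xs with
  | nil => rfl
  | cons x t ih =>
    rw [List.reverse_cons, List.foldl_append, ih]
    by_cases hx : x = 0
    · simp [hnAltStep, rsp, hx]
    · rcases hz : (rsp t).2 with _ | k
      · simp [hnAltStep, rsp, hx, hz]
      · simp [hnAltStep, rsp, hx, hz]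

-- ===== VERDICT (by name: the statement is the Claim_ definition above) =====
theorem hn_spec : Claim_equal_hn := by
  intro xs _
  unfold Spec_hn hn hn_alt
  rw [altFold_eq, hnOuter_eq xs xs.length 0 0 (by omega)]
  simp [outerS_spec]
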